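-- pv_equiv track=rewrite | github.com/ken-masters-git/FreeOnlineVideoDownloader | free_online_video_downloader.py | summarize_subtitle_rows
-- ===== SOURCE A (Python) =====
-- from typing import Any, Callable
--
-- def summarize_subtitle_rows(rows: list[dict[str, Any]]) -> str:
--     if not rows:
--         return "No subtitles detected."
--
--     def summarize_group(source: str, label: str) -> str | None:
--         languages = [row["language"] for row in rows if row["source"] == source]
--         if not languages:
--             return None
--         listed = ", ".join(languages[:5])
--         if len(languages) > 5:
--             listed = f"{listed}, +{len(languages) - 5} more"
--         return f"{label}: {listed}"
--
--     parts = [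
--         part
--         for part in (
--             summarize_group("manual", "Manual"),
--             summarize_group("auto", "Auto-generated"),
--         )
--         if part is not None
--     ]
--     return " | ".join(parts)
-- ===== SOURCE B (Python) =====
-- def summarize_subtitle_rows(rows: list) -> str:
--     if not rows:
--         return "No subtitles detected."
--     groups = {}
--     for row in rows:
--         src = row["source"]
--         if src == "manual" or src == "auto":
--             groups.setdefault(src, []).append(row["language"])
--     parts = []
--     for src, label in (("manual", "Manual"), ("auto", "Auto-generated")):
--         langs = groups.get(src)
--         if langs:
--             listed = ", ".join(langs[:5])
--             if len(langs) > 5: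
--                 listed = f"{listed}, +{len(langs) - 5} more"
--             parts.append(f"{label}: {listed}")
--     return " | ".join(parts)
-- ===== Notes on version B (the rewrite author's own statement) =====
-- stated objective: alternative
-- what changed: B replaces A's two separate filter-the-whole-list passes (one per source) with a single grouping pass that builds a source->languages dict and then formats the two fixed groups from it; Pre_ excludes only inputs where A raises KeyError (a row missing 'source', or a manual/auto row missing 'language').
import Mathlib
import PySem

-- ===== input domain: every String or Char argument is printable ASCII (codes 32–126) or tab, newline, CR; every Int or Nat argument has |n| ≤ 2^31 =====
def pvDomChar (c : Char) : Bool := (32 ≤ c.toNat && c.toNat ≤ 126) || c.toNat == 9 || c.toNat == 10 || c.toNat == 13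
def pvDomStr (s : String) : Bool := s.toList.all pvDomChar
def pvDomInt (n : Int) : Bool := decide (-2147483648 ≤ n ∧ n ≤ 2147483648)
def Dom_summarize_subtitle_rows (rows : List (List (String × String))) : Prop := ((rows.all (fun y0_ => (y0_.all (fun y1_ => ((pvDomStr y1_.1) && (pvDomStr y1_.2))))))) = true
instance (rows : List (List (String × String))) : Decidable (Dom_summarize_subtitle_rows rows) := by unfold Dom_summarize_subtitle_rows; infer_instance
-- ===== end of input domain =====

-- B groups rows into a source->languages dict in ONE pass, instead of A's two whole-list filter passes (one per source);
-- same output everywhere A returns (KeyError inputs are excluded by Pre_).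

-- row["k"] on a Python dict given as a pair list: dict(pairs) lookup; total form, default "" is
-- never reached under Pre_ (which requires the key to be present).
def pvRowGet (row : List (String × String)) (k : String) : String :=
  ((PySem.Dict.ofList row).get? k).getD ""

-- ===== PORT A =====
-- A's inner helper: filter the WHOLE row list by source, then map out the languages.
def pvSummarizeGroup (rows : List (List (String × String))) (source label : String) : Option String :=
  let languages := (rows.filter (fun r => pvRowGet r "source" == source)).map (fun r => pvRowGet r "language")
  if languages = [] then none
  else
    let listed := PySem.Str.join ", " (PySem.List.slice languages none (some 5))
    let listed := if languages.length > 5 then listed ++ ", +" ++ PySem.Int.toStr ((languages.length : Int) - 5) ++ " more" else listed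
    some (label ++ ": " ++ listed)

def summarize_subtitle_rows (rows : List (List (String × String))) : String :=
  if rows = [] then "No subtitles detected."
  else
    let parts := [pvSummarizeGroup rows "manual" "Manual",
                  pvSummarizeGroup rows "auto" "Auto-generated"].filterMap id
    PySem.Str.join " | " parts

-- ===== PORT B =====
-- one grouping step: groups.setdefault(src, []).append(row["language"]) for the two reported sources
def pvStepB (g : PySem.Dict String (List String)) (r : List (String × String)) : PySem.Dict String (List String) :=
  let src := pvRowGet r "source"
  if src == "manual" || src == "auto" then
    g.modify src [] (fun ls => ls ++ [pvRowGet r "language"])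
  else g

def pvFmtGroup (langs : List String) (label : String) : String :=
  let listed := PySem.Str.join ", " (PySem.List.slice langs none (some 5))
  let listed := if langs.length > 5 then listed ++ ", +" ++ PySem.Int.toStr ((langs.length : Int) - 5) ++ " more" else listed
  label ++ ": " ++ listed

def summarize_subtitle_rows_alt (rows : List (List (String × String))) : String :=
  if rows = [] then "No subtitles detected."
  else
    let groups := rows.foldl pvStepB PySem.Dict.empty
    let parts := [("manual", "Manual"), ("auto", "Auto-generated")].foldl
      (fun ps sl =>
        match groups.get? sl.1 with
        | some langs => if langs ≠ [] then ps ++ [pvFmtGroup langs sl.2] else ps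
        | none => ps) []
    PySem.Str.join " | " parts

-- ===== PRECONDITION & SPEC =====
-- Pre_ excludes exactly the inputs where the Python A raises KeyError: a row without a "source" key,
-- or a row whose source is "manual"/"auto" without a "language" key.
def Pre_summarize_subtitle_rows (rows : List (List (String × String))) : Prop :=
  ∀ r ∈ rows, (PySem.Dict.ofList r).contains "source" = true ∧
    (((PySem.Dict.ofList r).get? "source" = some "manual" ∨ (PySem.Dict.ofList r).get? "source" = some "auto") →
      (PySem.Dict.ofList r).contains "language" = true)
instance (rows : List (List (String × String))) : Decidable (Pre_summarize_subtitle_rows rows) := by unfold Pre_summarize_subtitle_rows; infer_instance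

def pvWitness_summarize_subtitle_rows : (List (List (String × String))) :=
  [[("source", "manual"), ("language", "en")], [("source", "other")]]

def Spec_summarize_subtitle_rows (rows : List (List (String × String))) (out : String) : Prop := out = summarize_subtitle_rows_alt rows
instance (rows : List (List (String × String))) (out : String) : Decidable (Spec_summarize_subtitle_rows rows out) := by unfold Spec_summarize_subtitle_rows; infer_instance

-- ===== CLAIM (what is proved, stated in full; the proofs are below) =====
def Claim_equal_summarize_subtitle_rows : Prop := ∀ (rows : List (List (String × String))), Dom_summarize_subtitle_rows rows → Pre_summarize_subtitle_rows rows → Spec_summarize_subtitle_rows rows (summarize_subtitle_rows rows)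

-- ===== LEMMAS AND PROOFS =====

-- B's fold accumulates, for each of the two reported sources, exactly A's filtered language list.
theorem pvStepB_fold_getD (rows : List (List (String × String))) (g : PySem.Dict String (List String))
    (s : String) (hs : s = "manual" ∨ s = "auto") :
    (rows.foldl pvStepB g).getD s [] =
      g.getD s [] ++ ((rows.filter (fun r => pvRowGet r "source" == s)).map (fun r => pvRowGet r "language")) := by
  induction rows generalizing g with
  | nil => simp
  | cons r rest ih =>
    simp only [List.foldl_cons, List.filter_cons]
    by_cases hsrc : pvRowGet r "source" = s
    · rw [ih]
      rcases hs with h | h <;>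
        simp [pvStepB, hsrc, h, PySem.Dict.getD_modify_self]
    · rw [ih]
      have hne : (pvRowGet r "source" == s) = false := by simp [hsrc]
      simp only [hne]
      by_cases hcond : (pvRowGet r "source" == "manual" || pvRowGet r "source" == "auto") = true
      · simp [pvStepB, hcond, PySem.Dict.getD_modify_of_ne _ _ _ (Ne.symm hsrc)]
      · simp [pvStepB, hcond]

-- B's match on groups.get? behaves as a test on getD (get? = some [] or none both skip, and
-- the filtered lists a fold of pvStepB stores are never the empty list anyway).
theorem pvMatchB (g : PySem.Dict String (List String)) (s label : String) (ps : List String) :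
    (match g.get? s with
     | some langs => if langs ≠ [] then ps ++ [pvFmtGroup langs label] else ps
     | none => ps)
    = if g.getD s [] ≠ [] then ps ++ [pvFmtGroup (g.getD s []) label] else ps := by
  rw [PySem.Dict.getD_eq_get?_getD]
  cases h : g.get? s with
  | none => simp
  | some langs => cases langs <;> simp

-- in the nonempty case A's group summary is exactly B's formatter applied to the filtered list
theorem pvGroup_eq_fmt (rows : List (List (String × String))) (s label : String)
    (h : (rows.filter (fun r => pvRowGet r "source" == s)).map (fun r => pvRowGet r "language") ≠ []) :
    pvSummarizeGroup rows s label =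
      some (pvFmtGroup ((rows.filter (fun r => pvRowGet r "source" == s)).map (fun r => pvRowGet r "language")) label) := by
  simp [pvSummarizeGroup, pvFmtGroup, h]

-- ===== VERDICT (by name: the statement is the Claim_ definition above) =====
theorem summarize_subtitle_rows_spec : Claim_equal_summarize_subtitle_rows := by
  intro rows _ _
  unfold Spec_summarize_subtitle_rows
  unfold summarize_subtitle_rows summarize_subtitle_rows_alt
  by_cases hnil : rows = []
  · simp [hnil]
  · simp only [hnil, if_false, List.foldl_cons, List.foldl_nil]
    rw [pvMatchB, pvMatchB,
        pvStepB_fold_getD rows _ "manual" (Or.inl rfl),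
        pvStepB_fold_getD rows _ "auto" (Or.inr rfl)]
    simp only [PySem.Dict.getD_empty, List.nil_append]
    set Lm := (rows.filter (fun r => pvRowGet r "source" == "manual")).map (fun r => pvRowGet r "language") with hLm
    set La := (rows.filter (fun r => pvRowGet r "source" == "auto")).map (fun r => pvRowGet r "language") with hLa
    by_cases hm : Lm = [] <;> by_cases ha : La = []
    · simp [pvSummarizeGroup, ← hLm, ← hLa, hm, ha]
    · rw [pvGroup_eq_fmt rows "auto" "Auto-generated" (by rw [← hLa]; exact ha)]
      simp only [pvSummarizeGroup, ← hLm, ← hLa, hm]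
      simp [ha]
    · rw [pvGroup_eq_fmt rows "manual" "Manual" (by rw [← hLm]; exact hm)]
      simp only [pvSummarizeGroup, ← hLm, ← hLa, ha]
      simp [hm]
    · rw [pvGroup_eq_fmt rows "manual" "Manual" (by rw [← hLm]; exact hm),
          pvGroup_eq_fmt rows "auto" "Auto-generated" (by rw [← hLa]; exact ha)]
      rw [← hLm, ← hLa]
      simp [hm, ha]
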